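-- pv_equiv track=rewrite | github.com/asweigart/programmedpatterns | book/visualpatterns.py | formula36
-- ===== SOURCE A (Python) =====
-- def formula36(step):
--     count = 1
--     i = 2
--     while True:
--         if i > step:
--             break
--         count += 0
--         i += 1
--
--         if i > step:
--             break
--         count += 2
--         i += 1
--
--         if i > step:
--             break
--         count += 0
--         i += 1
--     return count
-- ===== SOURCE B (Python) =====
-- def formula36(step):
--     return 1 + 2 * max(0, step // 3)
-- ===== Notes on version B (the rewrite author's own statement) =====
-- stated objective: faster
-- what changed: Replaced the unrolled counting loop (which adds 2 for every multiple of 3 between 3 and step) with the closed form 1 + 2*max(0, step//3).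
import Mathlib
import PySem

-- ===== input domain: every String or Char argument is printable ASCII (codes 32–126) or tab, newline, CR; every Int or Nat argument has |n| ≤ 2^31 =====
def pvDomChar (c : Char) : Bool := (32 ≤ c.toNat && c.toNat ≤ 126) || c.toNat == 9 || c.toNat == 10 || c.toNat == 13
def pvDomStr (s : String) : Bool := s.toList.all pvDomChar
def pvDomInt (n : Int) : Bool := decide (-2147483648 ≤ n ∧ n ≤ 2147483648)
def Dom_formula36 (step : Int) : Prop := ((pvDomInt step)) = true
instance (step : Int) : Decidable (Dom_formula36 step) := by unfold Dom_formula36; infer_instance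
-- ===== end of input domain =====

-- B replaces A's O(step) unrolled counting loop with the closed form 1 + 2*max(0, step//3) (objective: faster).

-- ===== PORT A =====
-- A's `while True` loop with three checked increments per round; i rises by 3 each
-- full round, so (step - i).toNat is the termination measure.
def formula36_loop (step i count : Int) : Int :=
  if i > step then count
  else if i + 1 > step then count + 0
  else if i + 1 + 1 > step then count + 0 + 2
  else formula36_loop step (i + 1 + 1 + 1) (count + 0 + 2 + 0)
termination_by (step - i).toNat
decreasing_by omega

def formula36 (step : Int) : Int := formula36_loop step 2 1

-- ===== PORT B =====
def formula36_alt (step : Int) : Int := 1 + 2 * max 0 (PySem.Int.floordiv step 3)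

-- ===== PRECONDITION & SPEC =====
def Spec_formula36 (step : Int) (out : Int) : Prop := out = formula36_alt step
instance (step : Int) (out : Int) : Decidable (Spec_formula36 step out) := by unfold Spec_formula36; infer_instance

-- ===== CLAIM (what is proved, stated in full; the proofs are below) =====
def Claim_equal_formula36 : Prop := ∀ (step : Int), Dom_formula36 step → Spec_formula36 step (formula36 step)

-- ===== LEMMAS AND PROOFS =====

-- Loop invariant: entering the loop at i = 3k+2, it adds 2 for every multiple of 3 in (i, step].
theorem formula36_loop_eq (step : Int) (n : Nat) :
    ∀ (k count : Int), (step - (3 * k + 2)).toNat = n →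
      formula36_loop step (3 * k + 2) count = count + 2 * max 0 (step / 3 - k) := by
  induction n using Nat.strongRecOn with
  | _ n ih =>
    intro k count hn
    rw [formula36_loop]
    split
    · omega
    split
    · omega
    split
    · omega
    · have hrec : 3 * k + 2 + 1 + 1 + 1 = 3 * (k + 1) + 2 := by omega
      rw [hrec, ih (step - (3 * (k + 1) + 2)).toNat (by omega) (k + 1) (count + 0 + 2 + 0) rfl]
      omega

theorem formula36_spec : Claim_equal_formula36 := by
  intro step _
  unfold Spec_formula36 formula36 formula36_alt
  rw [PySem.Int.floordiv_eq_ediv_of_pos (by norm_num)]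
  have h := formula36_loop_eq step (step - 2).toNat 0 1 (by omega)
  simp only [mul_zero, zero_add, sub_zero] at h
  rw [h]
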